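-- pv_equiv track=rewrite | github.com/mayflower/amicable | src/gitlab/commit_message.py | evaluate_agent_readme_policy
-- ===== SOURCE A (Python) =====
-- def _parse_name_status_paths(name_status: str) -> list[str]:
--     paths: list[str] = []
--     for raw in (name_status or "").splitlines():
--         line = raw.strip()
--         if not line:
--             continue
--         parts = line.split("\t")
--         if not parts:
--             continue
--         status = parts[0].strip().upper()
--         if status.startswith(("R", "C")) and len(parts) >= 3:
--             # For rename/copy, include source and destination.
--             paths.extend([parts[1].strip(), parts[2].strip()])
--             continue
--         if len(parts) >= 2:
--             paths.append(parts[-1].strip())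
--     return [p.lstrip("./") for p in paths if p.strip()]
--
-- def _is_doc_path(path: str) -> bool:
--     p = (path or "").strip().lstrip("/")
--     if not p:
--         return False
--     pl = p.lower()
--     if pl.startswith("docs/"):
--         return True
--     return bool(pl.endswith(".md") or pl.endswith(".mdx"))
--
-- def _satisfies_readme_requirement(path: str) -> bool:
--     p = (path or "").strip().lstrip("/").lower()
--     return p in ("readme.md", "docs/index.md")
--
-- def evaluate_agent_readme_policy(name_status: str) -> list[str]:
--     """Return policy warnings for agent commits based on staged name-status."""
--     paths = _parse_name_status_paths(name_status)
--     if not paths: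
--         return []
--
--     has_non_doc = any(not _is_doc_path(p) for p in paths)
--     has_readme_update = any(_satisfies_readme_requirement(p) for p in paths)
--     if not has_non_doc or has_readme_update:
--         return []
--
--     return [
--         "README policy: non-doc files changed without updating README.md or docs/index.md."
--     ]
-- ===== SOURCE B (Python) =====
-- def evaluate_agent_readme_policy(name_status: str) -> list[str]:
--     """Index/slice scanner: locates tab positions with find/rfind and slices the fields
--     out directly, deciding on the fly with an early return; no parts or paths lists."""
--     seen = False
--     non_doc = False
--     for raw in (name_status or "").splitlines():
--         line = raw.strip()
--         i = line.find("\t")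
--         if i < 0:
--             continue
--         if line[:i].strip().upper()[:1] in ("R", "C"):
--             j = line.find("\t", i + 1)
--         else:
--             j = -1
--         if j >= 0:
--             k = line.find("\t", j + 1)
--             cands = (line[i + 1 : j], line[j + 1 :] if k < 0 else line[j + 1 : k])
--         else:
--             cands = (line[line.rfind("\t") + 1 :],)
--         for c in cands:
--             p = c.strip()
--             if not p:
--                 continue
--             seen = True
--             q = p.lstrip("./").strip().lstrip("/").lower()
--             if q in ("readme.md", "docs/index.md"):
--                 return []
--             if not (q and (q.startswith("docs/") or q.endswith((".md", ".mdx")))):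
--                 non_doc = True
--     if seen and non_doc:
--         return ["README policy: non-doc files changed without updating README.md or docs/index.md."]
--     return []
-- ===== Notes on version B (the rewrite author's own statement) =====
-- stated objective: alternative
-- what changed: B replaces A's pipeline (splitlines, per-line split into a field list, an accumulated paths list, then two any() scans) with an index/slice scanner: it locates tab positions with find/rfind, slices the fields out directly without building parts or paths lists, and decides on the fly with an early return as soon as a README-satisfying path is seen.
import Mathlib
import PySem

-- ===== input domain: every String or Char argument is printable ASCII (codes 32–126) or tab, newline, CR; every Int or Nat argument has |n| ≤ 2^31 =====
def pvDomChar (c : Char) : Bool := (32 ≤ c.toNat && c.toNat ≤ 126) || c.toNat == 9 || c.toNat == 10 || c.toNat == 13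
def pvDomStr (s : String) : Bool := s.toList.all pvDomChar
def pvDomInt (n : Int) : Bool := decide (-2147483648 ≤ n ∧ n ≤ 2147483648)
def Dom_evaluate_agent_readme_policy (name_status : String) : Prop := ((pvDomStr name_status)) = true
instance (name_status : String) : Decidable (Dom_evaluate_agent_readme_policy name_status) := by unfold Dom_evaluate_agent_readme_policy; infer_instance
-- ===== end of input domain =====

-- B replaces A's build-field-lists-then-paths-list-then-two-any-scans pipeline with an
-- index/slice scanner: it locates tab positions with find/rfind, slices the fields out
-- directly, and decides on the fly with an early return (objective: alternative, same cost).

-- ===== PORT A =====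
-- exact port of Python str.lstrip(chars): drop leading characters that are in `chars`
def pvLstripCh (s : String) (chars : List Char) : String :=
  String.ofList (s.toList.dropWhile (fun c => chars.contains c))

def pvMsg : String :=
  "README policy: non-doc files changed without updating README.md or docs/index.md."

def pvStepA (paths : List String) (raw : String) : List String :=
  let line := PySem.Str.strip raw
  if line = "" then paths
  else
    let parts := (PySem.Str.split? line "\t").getD []
    if parts = [] then paths
    else
      let status := PySem.Str.upper (PySem.Str.strip ((PySem.List.pyGet? parts 0).getD ""))
      if (PySem.Str.startswith status "R" || PySem.Str.startswith status "C") ∧ 3 ≤ parts.length then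
        paths ++ [PySem.Str.strip ((PySem.List.pyGet? parts 1).getD ""),
                  PySem.Str.strip ((PySem.List.pyGet? parts 2).getD "")]
      else if 2 ≤ parts.length then
        paths ++ [PySem.Str.strip ((PySem.List.pyGet? parts (-1)).getD "")]
      else paths

def pv_parse_name_status_paths (name_status : String) : List String :=
  let paths := (PySem.Str.splitlines name_status).foldl pvStepA []
  (paths.filter (fun p => !(PySem.Str.strip p == ""))).map (fun p => pvLstripCh p ['.', '/'])

def pv_is_doc_path (path : String) : Bool :=
  let p := pvLstripCh (PySem.Str.strip path) ['/']
  if p = "" then false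
  else
    let pl := PySem.Str.lower p
    if PySem.Str.startswith pl "docs/" then true
    else PySem.Str.endswith pl ".md" || PySem.Str.endswith pl ".mdx"

def pv_satisfies_readme_requirement (path : String) : Bool :=
  let p := PySem.Str.lower (pvLstripCh (PySem.Str.strip path) ['/'])
  p == "readme.md" || p == "docs/index.md"

def evaluate_agent_readme_policy (name_status : String) : List String :=
  let paths := pv_parse_name_status_paths name_status
  if paths = [] then []
  else
    let has_non_doc := paths.any (fun p => !pv_is_doc_path p)
    let has_readme := paths.any pv_satisfies_readme_requirement
    if !has_non_doc || has_readme then [] else [pvMsg]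

-- ===== PORT B =====
-- the candidate field slices of one line, located by find/findFrom/rfind (Source B's cands)
def pvCandsB (raw : String) : List String :=
  let line := PySem.Str.strip raw
  let i := PySem.Str.find line "\t"
  if i < 0 then []
  else
    let status1 := PySem.Str.slice (PySem.Str.upper (PySem.Str.strip (PySem.Str.slice line none (some i)))) none (some 1)
    let j := if status1 == "R" || status1 == "C" then PySem.Str.findFrom line "\t" (i+1) none else -1
    if 0 ≤ j then
      let k := PySem.Str.findFrom line "\t" (j+1) none
      [PySem.Str.slice line (some (i+1)) (some j),
       if k < 0 then PySem.Str.slice line (some (j+1)) none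
       else PySem.Str.slice line (some (j+1)) (some k)]
    else
      [PySem.Str.slice line (some (PySem.Str.rfind line "\t" + 1)) none]

-- one candidate: update (seen, non_doc), `none` = Source B's early `return []`
def pvCandStep (st : Bool × Bool) (c : String) : Option (Bool × Bool) :=
  let p := PySem.Str.strip c
  if p == "" then some st
  else
    let q := PySem.Str.lower (pvLstripCh (PySem.Str.strip (pvLstripCh p ['.', '/'])) ['/'])
    if q == "readme.md" || q == "docs/index.md" then none
    else some (true, st.2 || !((!(q == "")) && (PySem.Str.startswith q "docs/" || PySem.Str.endswith q ".md" || PySem.Str.endswith q ".mdx")))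

def pvFoldCands : List String → (Bool × Bool) → Option (Bool × Bool)
  | [], st => some st
  | c :: cs, st =>
    match pvCandStep st c with
    | none => none
    | some st' => pvFoldCands cs st'

def pvScanLines : List String → (Bool × Bool) → Option (Bool × Bool)
  | [], st => some st
  | raw :: rest, st =>
    match pvFoldCands (pvCandsB raw) st with
    | none => none
    | some st' => pvScanLines rest st'

def evaluate_agent_readme_policy_alt (name_status : String) : List String :=
  match pvScanLines (PySem.Str.splitlines name_status) (false, false) with
  | none => []
  | some st => if st.1 && st.2 then [pvMsg] else []

-- ===== PRECONDITION & SPEC =====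
def Spec_evaluate_agent_readme_policy (name_status : String) (out : List String) : Prop := out = evaluate_agent_readme_policy_alt name_status
instance (name_status : String) (out : List String) : Decidable (Spec_evaluate_agent_readme_policy name_status out) := by unfold Spec_evaluate_agent_readme_policy; infer_instance

-- ===== CLAIM (what is proved, stated in full; the proofs are below) =====
def Claim_equal_evaluate_agent_readme_policy : Prop := ∀ (name_status : String), Dom_evaluate_agent_readme_policy name_status → Spec_evaluate_agent_readme_policy name_status (evaluate_agent_readme_policy name_status)

-- ===== LEMMAS AND PROOFS =====

def pvSplit (c : Char) : List Char → List (List Char)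
  | [] => [[]]
  | x :: xs =>
    if x = c then [] :: pvSplit c xs
    else
      match pvSplit c xs with
      | r :: rs => (x :: r) :: rs
      | [] => [[x]]

theorem pvSplit_ne_nil (c : Char) (l : List Char) : pvSplit c l ≠ [] := by
  induction l with
  | nil => simp [pvSplit]
  | cons x xs ih =>
    simp only [pvSplit]
    split_ifs
    · simp
    · cases h : pvSplit c xs <;> simp

theorem pvSplit_not_mem (c : Char) (l : List Char) (h : c ∉ l) : pvSplit c l = [l] := by
  induction l with
  | nil => rfl
  | cons x xs ih =>
    simp only [List.mem_cons, not_or] at h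
    simp only [pvSplit]
    rw [if_neg (fun hc => h.1 hc.symm)]
    rw [ih h.2]

theorem pvSplit_first (c : Char) (a b : List Char) (h : c ∉ a) :
    pvSplit c (a ++ c :: b) = a :: pvSplit c b := by
  induction a with
  | nil => simp [pvSplit]
  | cons x xs ih =>
    simp only [List.mem_cons, not_or] at h
    simp only [List.cons_append, pvSplit]
    rw [if_neg (fun hc => h.1 hc.symm), ih h.2]

theorem mem_split_first (c : Char) (l : List Char) (h : c ∈ l) :
    ∃ a b, l = a ++ c :: b ∧ c ∉ a := by
  induction l with
  | nil => cases h
  | cons x xs ih =>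
    by_cases hx : x = c
    · exact ⟨[], xs, by simp [hx], by simp⟩
    · have hm : c ∈ xs := by
        cases List.mem_cons.mp h with
        | inl h' => exact absurd h'.symm hx
        | inr h' => exact h'
      obtain ⟨a, b, rfl, hna⟩ := ih hm
      refine ⟨x :: a, b, by simp, ?_⟩
      simp only [List.mem_cons, not_or]
      exact ⟨fun hc => hx hc.symm, hna⟩

theorem mem_split_last (c : Char) (l : List Char) (h : c ∈ l) :
    ∃ a b, l = a ++ c :: b ∧ c ∉ b := by
  obtain ⟨a, b, hl, hna⟩ := mem_split_first c l.reverse (by simpa using h)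
  refine ⟨b.reverse, a.reverse, ?_, by simpa using hna⟩
  have := congrArg List.reverse hl
  simpa using this

theorem splitOn_go_spec (c : Char) (l cur : List Char) (acc : List (List Char))
    (fuel : Nat) (hf : l.length ≤ fuel) :
    PySem.Chars.splitOn.go [c] fuel l cur acc =
      acc.reverse ++ (match pvSplit c l with
        | r :: rs => (cur.reverse ++ r) :: rs
        | [] => []) := by
  induction l generalizing fuel cur acc with
  | nil =>
    cases fuel <;> simp [PySem.Chars.splitOn.go, pvSplit]
  | cons x xs ih =>
    cases fuel with
    | zero => simp at hf
    | succ f =>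
      simp only [List.length_cons] at hf
      rw [PySem.Chars.splitOn.go]
      by_cases hx : x = c
      · have hpre : List.isPrefixOf [c] (x :: xs) = true := by
          simp [List.isPrefixOf, hx]
        rw [if_pos hpre]
        simp only [List.length_singleton, List.drop_one, List.tail_cons]
        rw [ih [] (cur.reverse :: acc) f (by omega)]
        simp only [pvSplit, if_pos hx]
        cases h : pvSplit c xs with
        | nil => exact absurd h (pvSplit_ne_nil c xs)
        | cons r rs => simp
      · have hpre : List.isPrefixOf [c] (x :: xs) = false := by
          simp [List.isPrefixOf]
          intro hc; exact absurd hc.symm hx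
        rw [if_neg (by simp [hpre])]
        rw [ih (x :: cur) acc f (by omega)]
        simp only [pvSplit, if_neg hx]
        cases h : pvSplit c xs with
        | nil => exact absurd h (pvSplit_ne_nil c xs)
        | cons r rs => simp

theorem splitOn_singleton (c : Char) (l : List Char) :
    PySem.Chars.splitOn l [c] = pvSplit c l := by
  unfold PySem.Chars.splitOn
  rw [splitOn_go_spec c l [] [] (l.length + 1) (by omega)]
  cases h : pvSplit c l with
  | nil => exact absurd h (pvSplit_ne_nil c l)
  | cons r rs => simp

theorem length_pvSplit_ge_two (c : Char) (l : List Char) (h : c ∈ l) :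
    2 ≤ (pvSplit c l).length := by
  induction l with
  | nil => cases h
  | cons x xs ih =>
    simp only [pvSplit]
    by_cases hx : x = c
    · rw [if_pos hx]
      have := pvSplit_ne_nil c xs
      cases hs : pvSplit c xs with
      | nil => exact absurd hs this
      | cons r rs => simp
    · rw [if_neg hx]
      have hm : c ∈ xs := by
        cases List.mem_cons.mp h with
        | inl h' => exact absurd h'.symm hx
        | inr h' => exact h'
      cases hs : pvSplit c xs with
      | nil => exact absurd hs (pvSplit_ne_nil c xs)
      | cons r rs =>
        have := ih hm
        rw [hs] at this
        simpa using this

theorem getLast?_pvSplit (c : Char) (a b : List Char) (h : c ∉ b) :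
    (pvSplit c (a ++ c :: b)).getLast? = some b := by
  induction a with
  | nil =>
    simp only [List.nil_append, pvSplit]
    have hb : pvSplit c b = [b] := by
      induction b with
      | nil => rfl
      | cons y ys ihy =>
        simp only [List.mem_cons, not_or] at h
        simp only [pvSplit]
        rw [if_neg (fun hc => h.1 hc.symm), ihy h.2]
    rw [hb]
    rfl
  | cons x xs ih =>
    simp only [List.cons_append, pvSplit]
    by_cases hx : x = c
    · rw [if_pos hx]
      have hcons : ∀ (x : List Char) (l : List (List Char)), l ≠ [] → (x :: l).getLast? = l.getLast? := by
        intro x l hl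
        cases l with
        | nil => exact absurd rfl hl
        | cons a as => simp [List.getLast?_cons_cons]
      rw [hcons [] _ (pvSplit_ne_nil c (xs ++ c :: b))]
      exact ih
    · rw [if_neg hx]
      cases hs : pvSplit c (xs ++ c :: b) with
      | nil => exact absurd hs (pvSplit_ne_nil c _)
      | cons r rs =>
        cases rs with
        | nil =>
          exfalso
          have := length_pvSplit_ge_two c (xs ++ c :: b) (by simp)
          rw [hs] at this
          simp at this
        | cons r2 rs2 =>
          have h1 : ((x :: r) :: r2 :: rs2).getLast? = (r :: r2 :: rs2).getLast? := by simp
          rw [h1, ← hs]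
          exact ih

theorem find_go_cons (c : Char) (x : Char) (t : List Char) (k : Nat) :
    PySem.Chars.find.go [c] (x :: t) k =
      if [c].isPrefixOf (x :: t) = true then (k : Int) else PySem.Chars.find.go [c] t (k + 1) := rfl

theorem rfind_go_succ (s : List Char) (c : Char) (j : Nat) :
    PySem.Chars.rfind.go s [c] (j + 1) =
      if [c].isPrefixOf (List.drop (j + 1) s) = true then ((j : Int) + 1)
      else PySem.Chars.rfind.go s [c] j := rfl

theorem rfind_go_zero (s : List Char) (c : Char) :
    PySem.Chars.rfind.go s [c] 0 = if [c].isPrefixOf s = true then 0 else -1 := rfl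

theorem isPrefixOf_singleton_cons (c x : Char) (t : List Char) :
    [c].isPrefixOf (x :: t) = (c == x) := by
  simp [List.isPrefixOf]

theorem find_go_singleton_append (c : Char) (a b : List Char) (h : c ∉ a) (k : Nat) :
    PySem.Chars.find.go [c] (a ++ c :: b) k = (k : Int) + a.length := by
  induction a generalizing k with
  | nil =>
    rw [List.nil_append, find_go_cons, isPrefixOf_singleton_cons]
    simp
  | cons x xs ih =>
    simp only [List.mem_cons, not_or] at h
    rw [List.cons_append, find_go_cons, isPrefixOf_singleton_cons]
    have : (c == x) = false := by simp; intro hc; exact h.1 hc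
    rw [this, if_neg (by simp), ih h.2 (k + 1)]
    simp only [List.length_cons]
    push_cast
    omega

theorem find_singleton_append (c : Char) (a b : List Char) (h : c ∉ a) :
    PySem.Chars.find (a ++ c :: b) [c] = a.length := by
  unfold PySem.Chars.find
  rw [find_go_singleton_append c a b h 0]
  simp

theorem find_singleton_not_mem (c : Char) (l : List Char) (h : c ∉ l) :
    PySem.Chars.find l [c] = -1 := by
  rw [PySem.Chars.find_eq_neg_one_iff]
  intro hinf
  exact h ((List.singleton_infix_iff c l).mp hinf)

theorem rfind_go_singleton (c : Char) (a b : List Char) (h : c ∉ b) (d : Nat)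
    (hd : d ≤ b.length + 1) :
    PySem.Chars.rfind.go (a ++ c :: b) [c] (a.length + d) = a.length := by
  induction d with
  | zero =>
    rw [Nat.add_zero]
    cases a with
    | nil =>
      rw [List.nil_append, List.length_nil, rfind_go_zero, isPrefixOf_singleton_cons]
      simp
    | cons y ys =>
      rw [show (y :: ys).length = ys.length + 1 from rfl, rfind_go_succ]
      have hdrop : List.drop (ys.length + 1) ((y :: ys) ++ c :: b) = c :: b := by
        rw [List.cons_append, List.drop_succ_cons, List.drop_left]
      rw [hdrop, isPrefixOf_singleton_cons]
      simp
  | succ d ih =>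
    rw [show a.length + (d + 1) = (a.length + d) + 1 by omega, rfind_go_succ]
    have hdrop : List.drop (a.length + d + 1) (a ++ c :: b) = List.drop d b := by
      rw [show a.length + d + 1 = a.length + (d + 1) by omega, List.drop_length_add_append]
      simp
    rw [hdrop]
    have hpre : [c].isPrefixOf (List.drop d b) = false := by
      cases hb : List.drop d b with
      | nil => simp [List.isPrefixOf]
      | cons y ys =>
        rw [isPrefixOf_singleton_cons]
        have hy : y ∈ b := List.mem_of_mem_drop (by rw [hb]; exact List.mem_cons_self ..)
        simp
        intro hc
        subst hc
        exact h hy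
    rw [if_neg (by simp [hpre]), ih (by omega)]

theorem rfind_singleton_append (c : Char) (a b : List Char) (h : c ∉ b) :
    PySem.Chars.rfind (a ++ c :: b) [c] = a.length := by
  unfold PySem.Chars.rfind
  rw [show (a ++ c :: b).length = a.length + (b.length + 1) by simp, rfind_go_singleton c a b h (b.length + 1) (by omega)]

theorem dropWhile_idem (p : Char → Bool) (l : List Char) :
    List.dropWhile p (List.dropWhile p l) = List.dropWhile p l := by
  cases h : List.dropWhile p l with
  | nil => rfl
  | cons x xs =>
    have hne : List.dropWhile p l ≠ [] := by rw [h]; simp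
    have hx : p x = false := by
      have := List.head_dropWhile_not p hne
      simp only [h, List.head_cons] at this
      exact this
    rw [List.dropWhile_cons, hx]
    simp

theorem rstrip_prefix (l : List Char) : PySem.Chars.rstrip l <+: l := by
  unfold PySem.Chars.rstrip
  obtain ⟨t, ht⟩ := List.dropWhile_suffix (l := l.reverse) PySem.Chars.isspace
  refine ⟨t.reverse, ?_⟩
  have := congrArg List.reverse ht
  simpa using this

theorem rstrip_idem (l : List Char) :
    PySem.Chars.rstrip (PySem.Chars.rstrip l) = PySem.Chars.rstrip l := by
  unfold PySem.Chars.rstrip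
  rw [List.reverse_reverse, dropWhile_idem]

theorem lstrip_rstrip_lstrip (l : List Char) :
    PySem.Chars.lstrip (PySem.Chars.rstrip (PySem.Chars.lstrip l)) =
      PySem.Chars.rstrip (PySem.Chars.lstrip l) := by
  cases h : PySem.Chars.rstrip (PySem.Chars.lstrip l) with
  | nil => rfl
  | cons x xs =>
    have hpre : PySem.Chars.rstrip (PySem.Chars.lstrip l) <+: PySem.Chars.lstrip l :=
      rstrip_prefix _
    rw [h] at hpre
    have hx : PySem.Chars.isspace x = false := by
      obtain ⟨t, ht⟩ := hpre
      have : PySem.Chars.lstrip l = x :: (xs ++ t) := by rw [← ht]; simp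
      unfold PySem.Chars.lstrip at this
      have hne : List.dropWhile PySem.Chars.isspace l ≠ [] := by rw [this]; simp
      have hh := List.head_dropWhile_not PySem.Chars.isspace hne
      simp only [this, List.head_cons] at hh
      exact hh
    unfold PySem.Chars.lstrip
    rw [List.dropWhile_cons, hx]
    simp

theorem strip_idem (l : List Char) :
    PySem.Chars.strip (PySem.Chars.strip l) = PySem.Chars.strip l := by
  unfold PySem.Chars.strip
  rw [lstrip_rstrip_lstrip, rstrip_idem]

theorem startswith_singleton_eq_take_one (s : List Char) (ch : Char) :
    PySem.Chars.startswith s [ch] = (s.take 1 == [ch]) := by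
  unfold PySem.Chars.startswith
  cases s with
  | nil => simp [List.isPrefixOf]
  | cons x xs =>
    simp [List.isPrefixOf, List.take]
    exact eq_comm

-- string-level bridges
theorem pvBeq_toList (a b : String) : (a == b) = (a.toList == b.toList) := by
  rw [Bool.eq_iff_iff]
  simp [String.toList_inj]

-- A-side per-line candidate list (what one iteration of A's loop appends)
def pvCands (raw : String) : List String :=
  let parts := (PySem.Str.split? (PySem.Str.strip raw) "\t").getD []
  let status := PySem.Str.upper (PySem.Str.strip ((PySem.List.pyGet? parts 0).getD ""))
  if (PySem.Str.startswith status "R" || PySem.Str.startswith status "C") ∧ 3 ≤ parts.length then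
    [PySem.Str.strip ((PySem.List.pyGet? parts 1).getD ""),
     PySem.Str.strip ((PySem.List.pyGet? parts 2).getD "")]
  else if 2 ≤ parts.length then
    [PySem.Str.strip ((PySem.List.pyGet? parts (-1)).getD "")]
  else []

theorem pvCands_empty (raw : String) (h : PySem.Str.strip raw = "") : pvCands raw = [] := by
  unfold pvCands; rw [h]; decide

theorem pvCands_nilparts (raw : String)
    (hp : (PySem.Str.split? (PySem.Str.strip raw) "\t").getD [] = []) : pvCands raw = [] := by
  unfold pvCands; rw [hp]; decide

theorem pvStepA_eq (acc : List String) (raw : String) : pvStepA acc raw = acc ++ pvCands raw := by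
  by_cases h : PySem.Str.strip raw = ""
  · rw [pvCands_empty raw h]
    simp only [pvStepA]
    rw [if_pos h, List.append_nil]
  · by_cases hp : (PySem.Str.split? (PySem.Str.strip raw) "\t").getD [] = []
    · rw [pvCands_nilparts raw hp]
      simp only [pvStepA]
      rw [if_neg h, hp, if_pos rfl, List.append_nil]
    · simp only [pvStepA, pvCands]
      rw [if_neg h]
      generalize (PySem.Str.split? (PySem.Str.strip raw) "\t").getD [] = parts at hp ⊢
      rw [if_neg hp]
      split_ifs <;> simp

theorem parse_eq_flatMap (ns : String) :
    pv_parse_name_status_paths ns =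
      (((PySem.Str.splitlines ns).flatMap pvCands).filter
        (fun p => !(PySem.Str.strip p == ""))).map (fun p => pvLstripCh p ['.', '/']) := by
  unfold pv_parse_name_status_paths
  have h1 : (PySem.Str.splitlines ns).foldl pvStepA ([] : List String)
      = (PySem.Str.splitlines ns).foldl (fun acc x => acc ++ pvCands x) [] := by
    apply PySem.List.foldl_congr_mem
    intro acc x _
    exact pvStepA_eq acc x
  rw [h1, PySem.List.foldl_append_eq_flatMap, List.nil_append]



theorem parts_eq (line : String) :
    (PySem.Str.split? line "\t").getD [] = (pvSplit '\t' line.toList).map String.ofList := by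
  have h := PySem.Str.split?_map line "\t"
  cases hs : PySem.Str.split? line "\t" with
  | none =>
    rw [hs] at h
    simp [PySem.Chars.split?] at h
  | some ps =>
    rw [hs] at h
    simp only [Option.map_some, PySem.Chars.split?, show ("\t".toList : List Char) = ['\t'] from by decide] at h
    rw [if_neg (by decide)] at h
    rw [splitOn_singleton] at h
    have := Option.some.inj h
    simp only [Option.getD_some]
    calc ps = ps.map (fun s => String.ofList s.toList) := by simp [String.ofList_toList]
      _ = (ps.map String.toList).map String.ofList := by rw [List.map_map]; rfl
      _ = (pvSplit '\t' line.toList).map String.ofList := by rw [this]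

theorem status_cond_eq (S : String) :
    ((PySem.Str.startswith S "R" || PySem.Str.startswith S "C"))
      = ((PySem.Str.slice S none (some 1) == "R") || (PySem.Str.slice S none (some 1) == "C")) := by
  have h1 : (PySem.Str.slice S none (some 1)).toList = S.toList.take 1 := by
    simp [pysem]
  rw [pvBeq_toList, pvBeq_toList, h1]
  rw [PySem.Str.startswith_eq, PySem.Str.startswith_eq]
  rw [show ("R".toList : List Char) = ['R'] from by decide, show ("C".toList : List Char) = ['C'] from by decide]
  rw [startswith_singleton_eq_take_one, startswith_singleton_eq_take_one]


theorem pyGet_neg_one {α : Type} (xs : List α) : PySem.List.pyGet? xs (-1) = xs.getLast? := by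
  simp [pysem]

theorem str_findFrom_tab (L : String) (k : Nat) (hk : k ≤ L.toList.length) :
    PySem.Str.findFrom L "\t" (k : Int) none =
      if PySem.Chars.find (L.toList.drop k) ['\t'] = -1 then -1
      else (k : Int) + PySem.Chars.find (L.toList.drop k) ['\t'] := by
  rw [PySem.Str.findFrom_eq, show ("\t".toList : List Char) = ['\t'] from by decide]
  exact PySem.Chars.findFrom_natCast _ _ k hk

set_option maxHeartbeats 2000000 in
theorem pvCands_eq_stripB (raw : String) :
    pvCands raw = (pvCandsB raw).map PySem.Str.strip := by
  simp only [pvCands, pvCandsB]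
  rw [parts_eq]
  have hfind : PySem.Str.find (PySem.Str.strip raw) "\t"
      = PySem.Chars.find (PySem.Str.strip raw).toList ['\t'] := by
    simp [pysem]
  by_cases hmem : '\t' ∈ (PySem.Str.strip raw).toList
  case neg =>
    rw [hfind, find_singleton_not_mem _ _ hmem, pvSplit_not_mem _ _ hmem]
    norm_num
  case pos =>
    obtain ⟨a, b, hl, hna⟩ := mem_split_first _ _ hmem
    rw [hfind, hl, find_singleton_append _ _ _ hna, pvSplit_first _ _ _ hna]
    rw [if_neg (show ¬((a.length : Int) < 0) by omega)]
    have hstat : PySem.Str.slice (PySem.Str.strip raw) none (some (a.length : Int)) = String.ofList a := by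
      apply String.toList_inj.mp
      simp only [PySem.Str.toList_slice, PySem.Chars.slice_eq_listSlice]
      rw [PySem.List.slice_to _ (by omega : (0:Int) ≤ (a.length : Int))]
      rw [String.toList_ofList, Int.toNat_natCast, hl, List.take_left]
    have hget0 : (PySem.List.pyGet? (List.map String.ofList (a :: pvSplit '\t' b)) 0).getD ""
        = String.ofList a := by simp [pysem]
    rw [hget0, hstat]
    rw [status_cond_eq (PySem.Str.upper (PySem.Str.strip (String.ofList a)))]
    cases hrc : (PySem.Str.slice (PySem.Str.upper (PySem.Str.strip (String.ofList a))) none (some 1) == "R" ||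
        PySem.Str.slice (PySem.Str.upper (PySem.Str.strip (String.ofList a))) none (some 1) == "C") with
    | false =>
      simp only [Bool.false_eq_true, false_and, if_false]
      rw [if_neg (by omega : ¬ (0:Int) ≤ -1)]
      obtain ⟨a', b', hl', hnb'⟩ := mem_split_last _ _ hmem
      have hrf : PySem.Str.rfind (PySem.Str.strip raw) "\t" = (a'.length : Int) := by
        rw [PySem.Str.rfind_eq, show ("\t".toList : List Char) = ['\t'] from by decide, hl',
          rfind_singleton_append _ _ _ hnb']
      rw [hrf]
      have hslice : PySem.Str.slice (PySem.Str.strip raw) (some ((a'.length : Int) + 1)) none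
          = String.ofList b' := by
        apply String.toList_inj.mp
        simp only [PySem.Str.toList_slice, PySem.Chars.slice_eq_listSlice]
        rw [PySem.List.slice_from _ (by omega : (0:Int) ≤ (a'.length : Int) + 1)]
        rw [String.toList_ofList, show ((a'.length : Int) + 1).toNat = a'.length + 1 by omega, hl',
          List.drop_length_add_append]
        rfl
      rw [hslice]
      have hlast : (PySem.List.pyGet? (List.map String.ofList (a :: pvSplit '\t' b)) (-1)).getD ""
          = String.ofList b' := by
        rw [pyGet_neg_one, List.getLast?_map, ← pvSplit_first _ _ _ hna, ← hl, hl',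
          getLast?_pvSplit _ _ _ hnb']
        rfl
      have hlen2 : 2 ≤ (List.map String.ofList (a :: pvSplit '\t' b)).length := by
        cases h' : pvSplit '\t' b with
        | nil => exact absurd h' (pvSplit_ne_nil '\t' b)
        | cons r rs => simp
      rw [if_pos hlen2, hlast]
      simp
    | true =>
      have hcast : ((a.length : Int) + 1) = ((a.length + 1 : Nat) : Int) := by push_cast; ring
      have hk1 : a.length + 1 ≤ (PySem.Str.strip raw).toList.length := by
        rw [hl]; simp
      have hdrop1 : (PySem.Str.strip raw).toList.drop (a.length + 1) = b := by
        rw [hl, show a.length + 1 = a.length + 1 from rfl, List.drop_length_add_append]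
        rfl
      simp only [true_and, if_true]
      rw [hcast, str_findFrom_tab _ _ hk1, hdrop1]
      by_cases hb : '\t' ∈ b
      case pos =>
        obtain ⟨a2, b2, hb2, hna2⟩ := mem_split_first _ _ hb
        subst hb2
        rw [find_singleton_append _ _ _ hna2]
        rw [if_neg (by omega : ¬ ((a2.length : Int) = -1))]
        rw [if_pos (by omega : (0:Int) ≤ ((a.length + 1 : Nat) : Int) + (a2.length : Int))]
        rw [pvSplit_first _ _ _ hna2]
        have hlen3 : 3 ≤ (List.map String.ofList (a :: a2 :: pvSplit '\t' b2)).length := by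
          cases h' : pvSplit '\t' b2 with
          | nil => exact absurd h' (pvSplit_ne_nil '\t' b2)
          | cons r rs => simp
        rw [if_pos hlen3]
        have hget1 : (PySem.List.pyGet? (List.map String.ofList (a :: a2 :: pvSplit '\t' b2)) 1).getD ""
            = String.ofList a2 := by simp [pysem]
        rw [hget1]
        have hslice1 : PySem.Str.slice (PySem.Str.strip raw) (some ((a.length + 1 : Nat) : Int))
            (some (((a.length + 1 : Nat) : Int) + (a2.length : Int))) = String.ofList a2 := by
          apply String.toList_inj.mp
          simp only [PySem.Str.toList_slice, PySem.Chars.slice_eq_listSlice]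
          rw [show (((a.length + 1 : Nat) : Int) + (a2.length : Int)) = ((a.length + 1 + a2.length : Nat) : Int) by push_cast; ring]
          rw [PySem.List.slice_natCast, hdrop1]
          rw [String.toList_ofList, show a.length + 1 + a2.length - (a.length + 1) = a2.length by omega,
            List.take_left]
        rw [hslice1]
        have hcast2 : ((a.length + 1 : Nat) : Int) + (a2.length : Int) + 1 = ((a.length + 1 + a2.length + 1 : Nat) : Int) := by
          push_cast; ring
        rw [hcast2]
        have hk2 : a.length + 1 + a2.length + 1 ≤ (PySem.Str.strip raw).toList.length := by
          rw [hl]; simp; omega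
        have hdrop2 : (PySem.Str.strip raw).toList.drop (a.length + 1 + a2.length + 1) = b2 := by
          rw [hl, show a ++ '\t' :: (a2 ++ '\t' :: b2) = (a ++ '\t' :: a2) ++ '\t' :: b2 by simp]
          rw [show a.length + 1 + a2.length + 1 = (a ++ '\t' :: a2).length + 1 by simp; omega]
          rw [List.drop_length_add_append]
          rfl
        rw [str_findFrom_tab _ _ hk2, hdrop2]
        by_cases hb2m : '\t' ∈ b2
        case pos =>
          obtain ⟨a3, b3, hb3, hna3⟩ := mem_split_first _ _ hb2m
          subst hb3
          rw [find_singleton_append _ _ _ hna3, pvSplit_first _ _ _ hna3]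
          rw [if_neg (show ¬(((a3.length : Int)) = -1) by omega)]
          rw [if_neg (show ¬(((a.length + 1 + a2.length + 1 : Nat) : Int) + (a3.length : Int) < 0) by omega)]
          have hget2 : (PySem.List.pyGet? (List.map String.ofList (a :: a2 :: a3 :: pvSplit '\t' b3)) 2).getD ""
              = String.ofList a3 := by simp [pysem]
          rw [hget2]
          have hslice2 : PySem.Str.slice (PySem.Str.strip raw) (some ((a.length + 1 + a2.length + 1 : Nat) : Int))
              (some (((a.length + 1 + a2.length + 1 : Nat) : Int) + (a3.length : Int))) = String.ofList a3 := by
            apply String.toList_inj.mp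
            simp only [PySem.Str.toList_slice, PySem.Chars.slice_eq_listSlice]
            rw [show (((a.length + 1 + a2.length + 1 : Nat) : Int) + (a3.length : Int)) = ((a.length + 1 + a2.length + 1 + a3.length : Nat) : Int) by push_cast; ring]
            rw [PySem.List.slice_natCast, hdrop2]
            rw [String.toList_ofList, show a.length + 1 + a2.length + 1 + a3.length - (a.length + 1 + a2.length + 1) = a3.length by omega,
              List.take_left]
          rw [hslice2]
          simp
        case neg =>
          rw [find_singleton_not_mem _ _ hb2m, if_pos rfl]
          rw [if_pos (show (-1 : Int) < 0 by omega)]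
          rw [pvSplit_not_mem _ _ hb2m]
          have hget2 : (PySem.List.pyGet? (List.map String.ofList (a :: a2 :: [b2])) 2).getD ""
              = String.ofList b2 := by simp [pysem]
          rw [hget2]
          have hslice2 : PySem.Str.slice (PySem.Str.strip raw) (some ((a.length + 1 + a2.length + 1 : Nat) : Int)) none
              = String.ofList b2 := by
            apply String.toList_inj.mp
            simp only [PySem.Str.toList_slice, PySem.Chars.slice_eq_listSlice]
            rw [PySem.List.slice_from _ (by omega : (0:Int) ≤ ((a.length + 1 + a2.length + 1 : Nat) : Int))]
            rw [String.toList_ofList, Int.toNat_natCast, hdrop2]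
          rw [hslice2]
          simp
      case neg =>
        rw [find_singleton_not_mem _ _ hb, if_pos rfl]
        rw [if_neg (by omega : ¬ (0:Int) ≤ -1)]
        have hrf : PySem.Str.rfind (PySem.Str.strip raw) "\t" = (a.length : Int) := by
          rw [PySem.Str.rfind_eq, show ("\t".toList : List Char) = ['\t'] from by decide, hl,
            rfind_singleton_append _ _ _ hb]
        rw [hrf]
        have hslice : PySem.Str.slice (PySem.Str.strip raw) (some ((a.length : Int) + 1)) none
            = String.ofList b := by
          apply String.toList_inj.mp
          simp only [PySem.Str.toList_slice, PySem.Chars.slice_eq_listSlice]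
          rw [PySem.List.slice_from _ (by omega : (0:Int) ≤ (a.length : Int) + 1)]
          rw [String.toList_ofList, show ((a.length : Int) + 1).toNat = a.length + 1 by omega, hl,
            List.drop_length_add_append]
          rfl
        rw [hslice, pvSplit_not_mem _ _ hb]
        have hL2 : (List.map String.ofList (a :: [b])).length = 2 := by
          simp only [List.length_map, List.length_cons, List.length_nil]
        rw [if_neg (show ¬ 3 ≤ (List.map String.ofList (a :: [b])).length by rw [hL2]; omega)]
        rw [if_pos (show 2 ≤ (List.map String.ofList (a :: [b])).length by rw [hL2])]
        have hlast : (PySem.List.pyGet? (List.map String.ofList [a, b]) (-1)).getD ""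
            = String.ofList b := by
          rw [pyGet_neg_one]
          simp
        rw [hlast]
        simp

-- string-level facts used by the decision layer
theorem str_strip_idem (s : String) :
    PySem.Str.strip (PySem.Str.strip s) = PySem.Str.strip s := by
  apply String.toList_inj.mp
  rw [PySem.Str.toList_strip, PySem.Str.toList_strip, strip_idem]

theorem str_lower_beq_empty (r : String) : (PySem.Str.lower r == "") = (r == "") := by
  rw [pvBeq_toList, pvBeq_toList, PySem.Str.toList_lower]
  cases h : r.toList with
  | nil => simp [PySem.Chars.lower]
  | cons x xs => simp [PySem.Chars.lower]

-- B's per-candidate data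
def pvQ (c : String) : String :=
  PySem.Str.lower (pvLstripCh (PySem.Str.strip (pvLstripCh (PySem.Str.strip c) ['.', '/'])) ['/'])

def pvGoodP (c : String) : Bool := !(PySem.Str.strip c == "")

def pvReadmeP (c : String) : Bool :=
  pvGoodP c && (pvQ c == "readme.md" || pvQ c == "docs/index.md")

def pvNonDocP (c : String) : Bool :=
  pvGoodP c && !((!(pvQ c == "")) &&
    (PySem.Str.startswith (pvQ c) "docs/" || PySem.Str.endswith (pvQ c) ".md" || PySem.Str.endswith (pvQ c) ".mdx"))

theorem foldCands_spec (cs : List String) (st : Bool × Bool) :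
    pvFoldCands cs st =
      if cs.any pvReadmeP then none
      else some (st.1 || cs.any pvGoodP, st.2 || cs.any pvNonDocP) := by
  induction cs generalizing st with
  | nil => simp [pvFoldCands]
  | cons c cs ih =>
    rw [show pvFoldCands (c :: cs) st
        = (match pvCandStep st c with
           | none => none
           | some st' => pvFoldCands cs st') from rfl]
    by_cases hp : (PySem.Str.strip c == "") = true
    · have hstep : pvCandStep st c = some st := by
        simp only [pvCandStep, if_pos hp]
      have hg : pvGoodP c = false := by simp [pvGoodP, hp]
      have hr : pvReadmeP c = false := by simp [pvReadmeP, hg]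
      have hn : pvNonDocP c = false := by simp [pvNonDocP, hg]
      rw [hstep]
      simp only [List.any_cons, hg, hr, hn, Bool.false_or]
      exact ih st
    · have hp' : (PySem.Str.strip c == "") = false := by
        cases h : (PySem.Str.strip c == "") with
        | false => rfl
        | true => exact absurd h hp
      have hg : pvGoodP c = true := by simp [pvGoodP, hp']
      by_cases hq : (pvQ c == "readme.md" || pvQ c == "docs/index.md") = true
      · have hstep : pvCandStep st c = none := by
          simp only [pvCandStep, hp', Bool.false_eq_true, if_false]
          simp only [pvQ] at hq
          rw [if_pos hq]
        have hr : pvReadmeP c = true := by simp [pvReadmeP, hg, hq]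
        rw [hstep]
        simp only [List.any_cons, hr, Bool.true_or, if_true]
      · have hq' : (pvQ c == "readme.md" || pvQ c == "docs/index.md") = false := by
          cases h : (pvQ c == "readme.md" || pvQ c == "docs/index.md") with
          | false => rfl
          | true => exact absurd h hq
        have hstep : pvCandStep st c
            = some (true, st.2 || !((!(pvQ c == "")) &&
                (PySem.Str.startswith (pvQ c) "docs/" || PySem.Str.endswith (pvQ c) ".md" || PySem.Str.endswith (pvQ c) ".mdx"))) := by
          simp only [pvCandStep, hp', Bool.false_eq_true, if_false]
          simp only [pvQ] at hq'
          rw [if_neg (by simp [hq'])]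
          rfl
        have hr : pvReadmeP c = false := by simp [pvReadmeP, hq']
        have hn : pvNonDocP c
            = !((!(pvQ c == "")) &&
                (PySem.Str.startswith (pvQ c) "docs/" || PySem.Str.endswith (pvQ c) ".md" || PySem.Str.endswith (pvQ c) ".mdx")) := by
          simp [pvNonDocP, hg]
        rw [hstep]
        dsimp only
        rw [ih]
        simp only [List.any_cons, hr, hg, hn, Bool.false_or, Bool.true_or]
        split_ifs with h1
        · rfl
        · simp [Bool.or_assoc]

theorem foldCands_append (xs ys : List String) (st : Bool × Bool) :
    pvFoldCands (xs ++ ys) st =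
      (match pvFoldCands xs st with
       | none => none
       | some st' => pvFoldCands ys st') := by
  induction xs generalizing st with
  | nil => rfl
  | cons c cs ih =>
    rw [List.cons_append]
    have h1 : ∀ (l : List String) (st : Bool × Bool), pvFoldCands (c :: l) st
        = (match pvCandStep st c with
           | none => none
           | some st' => pvFoldCands l st') := fun _ _ => rfl
    rw [h1, h1]
    cases pvCandStep st c with
    | none => rfl
    | some st' => exact ih st'

theorem scanLines_eq_fold (lines : List String) (st : Bool × Bool) :
    pvScanLines lines st = pvFoldCands (lines.flatMap pvCandsB) st := by
  induction lines generalizing st with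
  | nil => rfl
  | cons raw rest ih =>
    rw [List.flatMap_cons, foldCands_append]
    simp only [pvScanLines]
    cases pvFoldCands (pvCandsB raw) st with
    | none => rfl
    | some st' => exact ih st'

-- A's predicates, expressed on B's candidates
theorem satisfies_eq (c : String) :
    pv_satisfies_readme_requirement (pvLstripCh (PySem.Str.strip c) ['.', '/'])
      = (pvQ c == "readme.md" || pvQ c == "docs/index.md") := rfl

theorem isdoc_eq (c : String) :
    pv_is_doc_path (pvLstripCh (PySem.Str.strip c) ['.', '/'])
      = ((!(pvQ c == "")) &&
          (PySem.Str.startswith (pvQ c) "docs/" || PySem.Str.endswith (pvQ c) ".md" || PySem.Str.endswith (pvQ c) ".mdx")) := by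
  simp only [pv_is_doc_path, pvQ]
  by_cases hr : pvLstripCh (PySem.Str.strip (pvLstripCh (PySem.Str.strip c) ['.', '/'])) ['/'] = ""
  · rw [if_pos hr, hr]
    decide
  · rw [if_neg hr]
    have hq : (PySem.Str.lower (pvLstripCh (PySem.Str.strip (pvLstripCh (PySem.Str.strip c) ['.', '/'])) ['/']) == "") = false := by
      rw [str_lower_beq_empty]
      simp [hr]
    rw [hq]
    cases hsw : PySem.Str.startswith (PySem.Str.lower (pvLstripCh (PySem.Str.strip (pvLstripCh (PySem.Str.strip c) ['.', '/'])) ['/'])) "docs/" <;> simp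

theorem alt_eq (ns : String) :
    evaluate_agent_readme_policy_alt ns =
      (if ((PySem.Str.splitlines ns).flatMap pvCandsB).any pvReadmeP then []
       else if ((PySem.Str.splitlines ns).flatMap pvCandsB).any pvGoodP
              && ((PySem.Str.splitlines ns).flatMap pvCandsB).any pvNonDocP then [pvMsg]
       else []) := by
  unfold evaluate_agent_readme_policy_alt
  rw [scanLines_eq_fold, foldCands_spec]
  by_cases h : ((PySem.Str.splitlines ns).flatMap pvCandsB).any pvReadmeP = true
  · rw [if_pos h, if_pos h]
  · rw [if_neg h, if_neg h]
    simp only [Bool.false_or]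

theorem flatMap_cands_eq (ns : String) :
    (PySem.Str.splitlines ns).flatMap pvCands
      = ((PySem.Str.splitlines ns).flatMap pvCandsB).map PySem.Str.strip := by
  rw [List.map_flatMap]
  exact List.flatMap_congr (fun r _ => pvCands_eq_stripB r)

theorem a_shape (G : List String) :
    (if (((G.map PySem.Str.strip).filter (fun p => !(PySem.Str.strip p == ""))).map (fun p => pvLstripCh p ['.', '/'])) = [] then ([] : List String)
     else if !((((G.map PySem.Str.strip).filter (fun p => !(PySem.Str.strip p == ""))).map (fun p => pvLstripCh p ['.', '/'])).any (fun p => !pv_is_doc_path p))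
            || (((G.map PySem.Str.strip).filter (fun p => !(PySem.Str.strip p == ""))).map (fun p => pvLstripCh p ['.', '/'])).any pv_satisfies_readme_requirement then []
     else [pvMsg])
    = (if G.any pvReadmeP then []
       else if G.any pvGoodP && G.any pvNonDocP then [pvMsg]
       else []) := by
  have hfilter : (G.map PySem.Str.strip).filter (fun p => !(PySem.Str.strip p == ""))
      = (G.filter pvGoodP).map PySem.Str.strip := by
    induction G with
    | nil => rfl
    | cons c cs ih =>
      simp only [List.map_cons, List.filter_cons]
      rw [show (!(PySem.Str.strip (PySem.Str.strip c) == "")) = pvGoodP c by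
        rw [str_strip_idem]; rfl]
      cases pvGoodP c with
      | false => simpa using ih
      | true => simp [ih]
  rw [hfilter, List.map_map]
  have hnil : ((G.filter pvGoodP).map ((fun p => pvLstripCh p ['.', '/']) ∘ PySem.Str.strip)) = []
      ↔ G.any pvGoodP = false := by
    rw [List.map_eq_nil_iff, List.filter_eq_nil_iff, List.any_eq_false]
  have hany : ∀ (h : String → Bool),
      ((G.filter pvGoodP).map ((fun p => pvLstripCh p ['.', '/']) ∘ PySem.Str.strip)).any h
        = G.any (fun c => pvGoodP c && h (pvLstripCh (PySem.Str.strip c) ['.', '/'])) := by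
    intro h
    rw [List.any_map, List.any_filter]
    rfl
  have h1 : G.any (fun c => pvGoodP c && !pv_is_doc_path (pvLstripCh (PySem.Str.strip c) ['.', '/']))
      = G.any pvNonDocP := by
    have hfun : (fun c => pvGoodP c && !pv_is_doc_path (pvLstripCh (PySem.Str.strip c) ['.', '/'])) = pvNonDocP := by
      funext c
      rw [isdoc_eq]
      rfl
    rw [hfun]
  have h2 : G.any (fun c => pvGoodP c && pv_satisfies_readme_requirement (pvLstripCh (PySem.Str.strip c) ['.', '/']))
      = G.any pvReadmeP := by
    have hfun : (fun c => pvGoodP c && pv_satisfies_readme_requirement (pvLstripCh (PySem.Str.strip c) ['.', '/'])) = pvReadmeP := by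
      funext c
      rw [satisfies_eq]
      rfl
    rw [hfun]
  have himp : G.any pvReadmeP = true → G.any pvGoodP = true := by
    intro h
    obtain ⟨c, hc, hrc⟩ := List.any_eq_true.mp h
    refine List.any_eq_true.mpr ⟨c, hc, ?_⟩
    unfold pvReadmeP at hrc
    exact (Bool.and_eq_true_iff.mp hrc).1
  cases hg : G.any pvGoodP with
  | false =>
    rw [if_pos (hnil.mpr hg)]
    have hr : G.any pvReadmeP = false := by
      cases hcase : G.any pvReadmeP with
      | false => rfl
      | true =>
        rw [himp hcase] at hg
        simp at hg
    rw [hr]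
    simp
  | true =>
    have hne : ¬ ((G.filter pvGoodP).map ((fun p => pvLstripCh p ['.', '/']) ∘ PySem.Str.strip)) = [] := by
      intro hc
      rw [hnil.mp hc] at hg
      exact Bool.false_ne_true hg
    rw [if_neg hne, hany, hany, h1, h2]
    cases hr : G.any pvReadmeP with
    | true => simp
    | false =>
      cases hn : G.any pvNonDocP <;> simp

-- ===== VERDICT (by name: the statement is the Claim_ definition above) =====
theorem evaluate_agent_readme_policy_spec : Claim_equal_evaluate_agent_readme_policy := by
  intro ns _
  unfold Spec_evaluate_agent_readme_policy
  rw [alt_eq]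
  unfold evaluate_agent_readme_policy
  rw [parse_eq_flatMap, flatMap_cands_eq]
  exact a_shape _
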